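-- pv_equiv track=rewrite | github.com/beamable/docnerd | docnerd/doc_generator.py | compute_matching_docs
-- ===== SOURCE A (Python) =====
-- def compute_matching_docs(doc_paths: list[str], search_terms: list[str]) -> list[str]:
--     """Compute which docs match the search terms (case-insensitive path contains)."""
--     if not search_terms:
--         return []
--     matches: set[str] = set()
--     path_lower = {p: p.lower() for p in doc_paths}
--     for term in search_terms:
--         t = term.lower()
--         for path, pl in path_lower.items():
--             if t in pl:
--                 matches.add(path)
--     return sorted(matches)
-- ===== SOURCE B (Python) =====
-- def compute_matching_docs(doc_paths: list[str], search_terms: list[str]) -> list[str]: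
--     """Compute which docs match the search terms (case-insensitive path contains)."""
--     if not search_terms:
--         return []
--     terms = [t.lower() for t in search_terms]
--     out: list[str] = []
--     seen: set[str] = set()
--     for p in sorted(doc_paths):
--         if p in seen:
--             continue
--         seen.add(p)
--         pl = p.lower()
--         if any(t in pl for t in terms):
--             out.append(p)
--     return out
-- ===== Notes on version B (the rewrite author's own statement) =====
-- stated objective: alternative
-- what changed: B sorts the paths up front and does a single in-order pass with a seen-set, short-circuiting on the first matching term and appending matches directly so the output is built already sorted and deduplicated, instead of A's term-outer/path-inner nested loops that always scan every (term, path) pair, fill a match set and sort it at the end.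
import Mathlib
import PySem

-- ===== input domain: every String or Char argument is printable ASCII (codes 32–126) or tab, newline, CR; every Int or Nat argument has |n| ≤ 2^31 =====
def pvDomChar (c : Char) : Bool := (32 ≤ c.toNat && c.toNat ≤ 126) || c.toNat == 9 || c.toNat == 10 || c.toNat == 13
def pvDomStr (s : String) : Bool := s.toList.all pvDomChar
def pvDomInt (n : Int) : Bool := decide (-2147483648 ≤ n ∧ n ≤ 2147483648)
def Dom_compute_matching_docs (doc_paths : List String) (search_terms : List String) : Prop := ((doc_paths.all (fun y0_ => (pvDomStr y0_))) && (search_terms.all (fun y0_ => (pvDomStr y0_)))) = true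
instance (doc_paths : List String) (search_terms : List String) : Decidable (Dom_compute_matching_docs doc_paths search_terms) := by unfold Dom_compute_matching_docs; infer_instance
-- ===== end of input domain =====

-- B sorts the paths first and builds the (deduplicated) result in one in-order pass,
-- instead of A's nested term×path loops filling a set that is sorted at the end (objective: alternative).

-- ===== PORT A =====
def compute_matching_docs (doc_paths : List String) (search_terms : List String) : List String :=
  if search_terms = [] then []
  else
    let path_lower : PySem.Dict String String :=
      doc_paths.foldl (fun d p => d.insert p (PySem.Str.lower p)) PySem.Dict.empty
    let matched : PySem.Set String :=
      search_terms.foldl (fun m term =>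
        let t := PySem.Str.lower term
        path_lower.items.foldl (fun m pr => if PySem.Str.isIn t pr.2 then m.add pr.1 else m) m)
        PySem.Set.empty
    PySem.List.sorted matched (fun x => x) false

-- ===== PORT B =====
def compute_matching_docs_alt (doc_paths : List String) (search_terms : List String) : List String :=
  if search_terms = [] then []
  else
    let terms := search_terms.map PySem.Str.lower
    ((PySem.List.sorted doc_paths (fun x => x) false).foldl
      (fun (acc : List String × PySem.Set String) p =>
        if p ∈ acc.2 then acc
        else
          let seen := acc.2.add p
          let pl := PySem.Str.lower p
          if terms.any (fun t => PySem.Str.isIn t pl) then (acc.1 ++ [p], seen) else (acc.1, seen))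
      ([], PySem.Set.empty)).1

-- ===== PRECONDITION & SPEC =====
def Spec_compute_matching_docs (doc_paths : List String) (search_terms : List String) (out : List String) : Prop := out = compute_matching_docs_alt doc_paths search_terms
instance (doc_paths : List String) (search_terms : List String) (out : List String) : Decidable (Spec_compute_matching_docs doc_paths search_terms out) := by unfold Spec_compute_matching_docs; infer_instance

-- ===== CLAIM (what is proved, stated in full; the proofs are below) =====
def Claim_equal_compute_matching_docs : Prop := ∀ (doc_paths : List String) (search_terms : List String), Dom_compute_matching_docs doc_paths search_terms → Spec_compute_matching_docs doc_paths search_terms (compute_matching_docs doc_paths search_terms)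

-- ===== LEMMAS AND PROOFS =====

-- membership in A's path_lower dict: key ∈ doc_paths, value = its lowering
theorem mem_items_fold_lower (xs : List String) (d : PySem.Dict String String)
    (pr : String × String) :
    pr ∈ (xs.foldl (fun d p => d.insert p (PySem.Str.lower p)) d).items ↔
      (pr.1 ∈ xs ∧ pr.2 = PySem.Str.lower pr.1) ∨ (pr ∈ d.items ∧ pr.1 ∉ xs) := by
  induction xs generalizing d with
  | nil => simp
  | cons p xs ih =>
    simp only [List.foldl_cons, ih, PySem.Dict.mem_items_insert, List.mem_cons]
    by_cases h1 : pr.1 = p <;> by_cases h2 : pr.1 ∈ xs <;>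
      simp [h1, h2, Prod.ext_iff] <;> tauto

-- membership in the inner path loop's accumulated set
theorem mem_inner_fold (l : List (String × String)) (t : String) (m : PySem.Set String)
    (x : String) :
    x ∈ l.foldl (fun m pr => if PySem.Str.isIn t pr.2 then m.add pr.1 else m) m ↔
      x ∈ m ∨ ∃ pr ∈ l, PySem.Str.isIn t pr.2 = true ∧ x = pr.1 := by
  induction l generalizing m with
  | nil => simp
  | cons pr l ih =>
    simp only [List.foldl_cons, ih]
    by_cases h : PySem.Str.isIn t pr.2 = true <;>
      simp only [h, if_pos, ite_false, Bool.false_eq_true,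
        PySem.Set.mem_add, List.mem_cons] <;> aesop

-- the inner loop preserves Nodup of the accumulator
theorem nodup_inner_fold (l : List (String × String)) (t : String) (m : PySem.Set String)
    (hm : m.Nodup) :
    (l.foldl (fun m pr => if PySem.Str.isIn t pr.2 then m.add pr.1 else m) m).Nodup := by
  induction l generalizing m with
  | nil => exact hm
  | cons pr l ih =>
    simp only [List.foldl_cons]
    split
    · exact ih _ (PySem.Set.nodup_add _ _ hm)
    · exact ih _ hm

-- membership in A's matches set after the outer term loop
theorem mem_outer_fold (ts : List String) (l : List (String × String))
    (m : PySem.Set String) (x : String) :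
    x ∈ ts.foldl (fun m term =>
        l.foldl (fun m pr => if PySem.Str.isIn (PySem.Str.lower term) pr.2 then m.add pr.1 else m) m) m ↔
      x ∈ m ∨ ∃ term ∈ ts, ∃ pr ∈ l, PySem.Str.isIn (PySem.Str.lower term) pr.2 = true ∧ x = pr.1 := by
  induction ts generalizing m with
  | nil => simp
  | cons term ts ih =>
    simp only [List.foldl_cons, ih, mem_inner_fold, List.mem_cons]
    aesop

theorem nodup_outer_fold (ts : List String) (l : List (String × String))
    (m : PySem.Set String) (hm : m.Nodup) :
    (ts.foldl (fun m term =>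
        l.foldl (fun m pr => if PySem.Str.isIn (PySem.Str.lower term) pr.2 then m.add pr.1 else m) m) m).Nodup := by
  induction ts generalizing m with
  | nil => exact hm
  | cons term ts ih => exact ih _ (nodup_inner_fold _ _ _ hm)

-- abbreviation for B's loop body
def bStep (terms : List String) (acc : List String × PySem.Set String) (p : String) :
    List String × PySem.Set String :=
  if p ∈ acc.2 then acc
  else if terms.any (fun t => PySem.Str.isIn t (PySem.Str.lower p)) then
    (acc.1 ++ [p], acc.2.add p)
  else (acc.1, acc.2.add p)

-- membership in B's output accumulator
theorem mem_bfold (terms S : List String) (o : List String) (s : PySem.Set String) (x : String) :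
    x ∈ (S.foldl (bStep terms) (o, s)).1 ↔
      x ∈ o ∨ (x ∈ S ∧ x ∉ s ∧ (terms.any (fun t => PySem.Str.isIn t (PySem.Str.lower x))) = true) := by
  induction S generalizing o s with
  | nil => simp
  | cons p S ih =>
    simp only [List.foldl_cons, bStep]
    by_cases hp : p ∈ s
    · rw [if_pos hp, ih]
      constructor
      · rintro (h | ⟨h1, h2, h3⟩)
        · exact Or.inl h
        · exact Or.inr ⟨List.mem_cons_of_mem _ h1, h2, h3⟩
      · rintro (h | ⟨h1, h2, h3⟩)
        · exact Or.inl h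
        · rcases List.mem_cons.mp h1 with rfl | h1
          · exact absurd hp h2
          · exact Or.inr ⟨h1, h2, h3⟩
    · rw [if_neg hp]
      by_cases hm : (terms.any (fun t => PySem.Str.isIn t (PySem.Str.lower p))) = true
      · rw [if_pos hm, ih]
        constructor
        · rintro (h | ⟨h1, h2, h3⟩)
          · rcases List.mem_append.mp h with h | h
            · exact Or.inl h
            · rcases List.mem_singleton.mp h with rfl
              exact Or.inr ⟨List.mem_cons_self, hp, hm⟩
          · rw [PySem.Set.mem_add] at h2
            push Not at h2
            exact Or.inr ⟨List.mem_cons_of_mem _ h1, h2.1, h3⟩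
        · rintro (h | ⟨h1, h2, h3⟩)
          · exact Or.inl (List.mem_append.mpr (Or.inl h))
          · rcases List.mem_cons.mp h1 with rfl | h1
            · exact Or.inl (List.mem_append.mpr (Or.inr (List.mem_singleton.mpr rfl)))
            · by_cases hxp : x = p
              · subst hxp
                exact Or.inl (List.mem_append.mpr (Or.inr (List.mem_singleton.mpr rfl)))
              · refine Or.inr ⟨h1, ?_, h3⟩
                rw [PySem.Set.mem_add]
                rintro (h | h)
                · exact h2 h
                · exact hxp h
      · rw [if_neg hm, ih]
        constructor
        · rintro (h | ⟨h1, h2, h3⟩)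
          · exact Or.inl h
          · rw [PySem.Set.mem_add] at h2
            push Not at h2
            exact Or.inr ⟨List.mem_cons_of_mem _ h1, h2.1, h3⟩
        · rintro (h | ⟨h1, h2, h3⟩)
          · exact Or.inl h
          · rcases List.mem_cons.mp h1 with rfl | h1
            · exact absurd h3 hm
            · by_cases hxp : x = p
              · subst hxp
                exact absurd h3 hm
              · refine Or.inr ⟨h1, ?_, h3⟩
                rw [PySem.Set.mem_add]
                rintro (h | h)
                · exact h2 h
                · exact hxp h

-- B's output accumulator stays strictly increasing along a ≤-sorted input list
theorem pairwise_bfold (terms S : List String) (o : List String) (s : PySem.Set String)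
    (hS : S.Pairwise (fun a b => a ≤ b))
    (ho : o.Pairwise (· < ·))
    (hos : ∀ x ∈ o, ∀ y ∈ S, y ∉ s → x < y) :
    (S.foldl (bStep terms) (o, s)).1.Pairwise (· < ·) := by
  induction S generalizing o s with
  | nil => exact ho
  | cons p S ih =>
    rw [List.pairwise_cons] at hS
    simp only [List.foldl_cons, bStep]
    by_cases hp : p ∈ s
    · rw [if_pos hp]
      exact ih _ _ hS.2 ho (fun x hx y hy hys => hos x hx y (List.mem_cons_of_mem _ hy) hys)
    · have hlt : ∀ x ∈ o, x < p := fun x hx => hos x hx p (List.mem_cons_self) hp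
      by_cases hm : (terms.any (fun t => PySem.Str.isIn t (PySem.Str.lower p))) = true
      · rw [if_neg hp, if_pos hm]
        refine ih _ _ hS.2 ?_ ?_
        · rw [List.pairwise_append]
          exact ⟨ho, List.pairwise_singleton _ _, fun x hx y hy => (List.mem_singleton.mp hy) ▸ hlt x hx⟩
        · intro x hx y hy hys
          rw [PySem.Set.mem_add] at hys
          push Not at hys
          rcases List.mem_append.mp hx with hx | hx
          · exact hos x hx y (List.mem_cons_of_mem _ hy) hys.1
          · rw [List.mem_singleton] at hx
            subst hx
            exact lt_of_le_of_ne (hS.1 y hy) (Ne.symm hys.2)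
      · rw [if_neg hp, if_neg hm]
        refine ih _ _ hS.2 ho ?_
        intro x hx y hy hys
        rw [PySem.Set.mem_add] at hys
        push Not at hys
        exact hos x hx y (List.mem_cons_of_mem _ hy) hys.1

-- ===== VERDICT (by name: the statement is the Claim_ definition above) =====
theorem compute_matching_docs_spec : Claim_equal_compute_matching_docs := by
  intro doc_paths search_terms _
  unfold Spec_compute_matching_docs compute_matching_docs compute_matching_docs_alt
  by_cases hst : search_terms = []
  · simp [hst]
  · simp only [hst, ite_false]
    have hfold :
        ((PySem.List.sorted doc_paths (fun x => x) false).foldl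
          (bStep (search_terms.map PySem.Str.lower)) ([], PySem.Set.empty)).1
        = ((PySem.List.sorted doc_paths (fun x => x) false).foldl
          (fun (acc : List String × PySem.Set String) p =>
            if p ∈ acc.2 then acc
            else
              let seen := acc.2.add p
              let pl := PySem.Str.lower p
              if (search_terms.map PySem.Str.lower).any (fun t => PySem.Str.isIn t pl) then
                (acc.1 ++ [p], seen) else (acc.1, seen))
          ([], PySem.Set.empty)).1 := rfl
    rw [← hfold]
    -- B's result is a strictly increasing rearrangement of A's match set
    apply PySem.List.sorted_eq_of_perm_of_pairwise_lt
    · -- permutation: both nodup with the same membership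
      refine (List.perm_ext_iff_of_nodup
        (List.Pairwise.imp (fun h => ne_of_lt h)
          (pairwise_bfold _ _ [] PySem.Set.empty
            (PySem.List.sorted_pairwise doc_paths (fun x => x))
            (List.Pairwise.nil) (by simp)))
        (nodup_outer_fold _ _ _ List.nodup_nil)).mpr ?_
      intro x
      rw [mem_bfold, mem_outer_fold]
      simp only [PySem.Set.empty, List.not_mem_nil, false_or, not_false_iff, true_and,
        PySem.List.mem_sorted, List.any_eq_true, List.mem_map]
      constructor
      · rintro ⟨hx, t, ⟨term, hterm, rfl⟩, hc⟩
        exact ⟨term, hterm, (x, PySem.Str.lower x),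
          (mem_items_fold_lower _ _ _).mpr (Or.inl ⟨hx, rfl⟩), hc, rfl⟩
      · rintro ⟨term, hterm, pr, hpr, hc, rfl⟩
        rw [mem_items_fold_lower] at hpr
        rcases hpr with ⟨h1, h2⟩ | ⟨h, _⟩
        · exact ⟨h1, ⟨_, ⟨term, hterm, rfl⟩, h2 ▸ hc⟩⟩
        · simp [PySem.Dict.empty] at h
    · exact pairwise_bfold _ _ [] PySem.Set.empty
        (PySem.List.sorted_pairwise doc_paths (fun x => x))
        (List.Pairwise.nil) (by simp)
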